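-- pv_equiv track=rewrite | github.com/dlsxjzld/Algorithm | 백준/Silver/1972. 놀라운 문자열/놀라운 문자열.py | check
-- ===== SOURCE A (Python) =====
-- def check(depth, word):
--     start_set = set()
--     for i in range(len(word) - depth - 1):
--         start = word[i] + word[i + depth + 1]
--         if start in start_set:
--             return False
--         start_set.add(start)
--     return True
-- ===== SOURCE B (Python) =====
-- # B: sort the distance-(depth+1) pairs, then a pair repeats iff two equal ones become adjacent.
-- def check(depth, word):
--     pairs = sorted(word[i] + word[i + depth + 1] for i in range(len(word) - depth - 1))
--     return all(pairs[i] != pairs[i + 1] for i in range(len(pairs) - 1))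
-- ===== Notes on version B (the rewrite author's own statement) =====
-- stated objective: alternative
-- what changed: A grows a hash set during a single scan and returns False at the first repeated pair; B uses no set at all: it sorts the list of distance-(depth+1) pairs and reports uniqueness by checking that no two adjacent sorted pairs are equal (duplicates become adjacent after sorting).
-- outside the precondition, e.g. on check(-2, 'aaa'): A returns False, B raises IndexError
import Mathlib
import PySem

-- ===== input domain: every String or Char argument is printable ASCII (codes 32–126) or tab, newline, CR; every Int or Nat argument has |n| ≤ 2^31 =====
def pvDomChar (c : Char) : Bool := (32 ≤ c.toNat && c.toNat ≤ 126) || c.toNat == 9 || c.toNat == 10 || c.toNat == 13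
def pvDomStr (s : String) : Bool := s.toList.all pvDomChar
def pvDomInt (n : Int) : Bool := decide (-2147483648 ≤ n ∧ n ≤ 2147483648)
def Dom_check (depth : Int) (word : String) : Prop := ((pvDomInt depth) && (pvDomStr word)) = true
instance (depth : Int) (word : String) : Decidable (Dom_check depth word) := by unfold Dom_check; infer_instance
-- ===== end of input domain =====

-- B replaces A's hash-set scan (grow a set, early-return False on the first repeated pair) by a
-- sort: it sorts the list of distance-(depth+1) pairs and checks that no two adjacent sorted
-- pairs are equal — duplicates become adjacent after sorting; no set is used at all.

-- ===== PORT A =====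
-- the pair word[i] + word[i+depth+1]; none = IndexError in Python (excluded by Pre_)
def pvPair (depth : Int) (cs : List Char) (i : Int) : Option String :=
  match PySem.List.pyGet? cs i, PySem.List.pyGet? cs (i + depth + 1) with
  | some a, some b => some (String.ofList [a, b])
  | _, _ => none

-- the for-loop of A: indices still to visit, accumulated set start_set
def checkGo (depth : Int) (cs : List Char) : List Int → PySem.Set String → Bool
  | [], _ => true
  | i :: rest, s =>
    match pvPair depth cs i with
    | some start =>
        if PySem.Set.contains s start then false
        else checkGo depth cs rest (PySem.Set.add s start)
    | none => false   -- Python raises IndexError here; outside Pre_check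

def check (depth : Int) (word : String) : Bool :=
  let cs := word.toList
  checkGo depth cs (PySem.List.pyRange 0 ((cs.length : Int) - depth - 1) 1) PySem.Set.empty

-- ===== PORT B =====
def check_alt (depth : Int) (word : String) : Bool :=
  let cs := word.toList
  let pairs := (PySem.List.pyRange 0 ((cs.length : Int) - depth - 1) 1).map
      (fun i => (pvPair depth cs i).getD "")   -- getD: Python raises IndexError on none; outside Pre_check
  let sp := PySem.List.sorted pairs (fun x => x) false
  (PySem.List.pyRange 0 ((sp.length : Int) - 1) 1).all
      (fun i => (PySem.List.pyGet? sp i).getD "" != (PySem.List.pyGet? sp (i + 1)).getD "")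

-- ===== PRECONDITION & SPEC =====
-- Pre_ excludes depth ≤ -2, where the second index wraps around negatively and the scan runs past
-- the end of the word: A raises IndexError there unless an accidental wraparound duplicate makes it
-- return False early, and B's comprehension always raises IndexError there.
def Pre_check (depth : Int) (word : String) : Prop := -1 ≤ depth
instance (depth : Int) (word : String) : Decidable (Pre_check depth word) := by unfold Pre_check; infer_instance
def pvWitness_check : Int × String := (1, "abcabc")

def Spec_check (depth : Int) (word : String) (out : Bool) : Prop := out = check_alt depth word
instance (depth : Int) (word : String) (out : Bool) : Decidable (Spec_check depth word out) := by unfold Spec_check; infer_instance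

-- ===== CLAIM (what is proved, stated in full; the proofs are below) =====
def Claim_equal_check : Prop := ∀ (depth : Int) (word : String), Dom_check depth word → Pre_check depth word → Spec_check depth word (check depth word)

-- ===== LEMMAS AND PROOFS =====

-- in-range pyGet? succeeds
lemma pvPair_isSome (depth : Int) (cs : List Char) (i : Int)
    (h0 : 0 ≤ i) (h1 : i < (cs.length : Int) - depth - 1) (hd : -1 ≤ depth) :
    ∃ p, pvPair depth cs i = some p := by
  have hi : i < (cs.length : Int) := by omega
  have hj0 : 0 ≤ i + depth + 1 := by omega
  have hj : i + depth + 1 < (cs.length : Int) := by omega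
  have g1 : PySem.List.pyGet? cs i = some (cs[i.toNat]'(by omega)) := by
    simp [PySem.List.pyGet?, PySem.List.pyIdx?, h0, hi]
  have g2 : PySem.List.pyGet? cs (i + depth + 1) =
      some (cs[(i + depth + 1).toNat]'(by omega)) := by
    simp [PySem.List.pyGet?, PySem.List.pyIdx?, hj0, hj]
  exact ⟨String.ofList [cs[i.toNat]'(by omega), cs[(i + depth + 1).toNat]'(by omega)],
    by simp [pvPair, g1, g2]⟩

-- A's loop computes "the pair list extends s without a repeat", for a Nodup accumulator s
lemma checkGo_eq (depth : Int) (cs : List Char) (is : List Int) :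
    ∀ (s : PySem.Set String), s.Nodup →
    (∀ i ∈ is, ∃ p, pvPair depth cs i = some p) →
    checkGo depth cs is s = decide ((s ++ is.map (fun i => (pvPair depth cs i).getD "")).Nodup) := by
  induction is with
  | nil => intro s hs _; simp [checkGo, hs]
  | cons i rest ih =>
    intro s hs hall
    obtain ⟨p, hp⟩ := hall i (by simp)
    rw [checkGo, hp]
    dsimp only
    simp only [List.map_cons, hp, Option.getD_some]
    by_cases hmem : p ∈ s
    · rw [(PySem.Set.contains_iff s p).mpr hmem]
      simp only [if_true]
      have hnot : ¬ (s ++ p :: rest.map (fun j => (pvPair depth cs j).getD "")).Nodup := fun hn =>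
        (List.disjoint_of_nodup_append hn) hmem (by simp)
      simp [hnot]
    · have hc : PySem.Set.contains s p = false := by
        rw [← Bool.not_eq_true, PySem.Set.contains_iff]; exact hmem
      rw [hc]
      simp only [if_false, Bool.false_eq_true]
      rw [PySem.Set.add_of_not_mem hmem]
      have hsp : (s ++ [p]).Nodup := by
        simp only [List.nodup_append, List.nodup_cons, List.not_mem_nil, not_false_iff,
          List.nodup_nil, and_true, true_and]
        exact ⟨hs, fun a ha b hb hab => hmem (by simp at hb; exact hb ▸ hab ▸ ha)⟩
      rw [ih (s ++ [p]) hsp (fun j hj => hall j (by simp [hj]))]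
      simp [List.append_assoc]

-- adjacent ≤ and adjacent ≠ combine to adjacent <
lemma isChain_lt_of_le_ne (l : List String) (hle : List.IsChain (· ≤ ·) l)
    (hne : List.IsChain (· ≠ ·) l) : List.IsChain (· < ·) l := by
  induction l with
  | nil => exact List.isChain_nil
  | cons x t ih =>
    cases t with
    | nil => simp
    | cons y t' =>
      rw [List.isChain_cons_cons] at hle hne ⊢
      exact ⟨lt_of_le_of_ne hle.1 hne.1, ih hle.2 hne.2⟩

-- on a ≤-sorted list, Nodup is exactly "no two adjacent elements are equal"
lemma nodup_iff_isChain_ne (l : List String) (h : l.Pairwise (· ≤ ·)) :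
    l.Nodup ↔ List.IsChain (· ≠ ·) l := by
  constructor
  · exact fun hn => hn.isChain
  · intro hc
    have hlt : List.IsChain (· < ·) l := isChain_lt_of_le_ne l h.isChain hc
    exact (List.isChain_iff_pairwise.mp hlt).imp ne_of_lt

-- B's indexed all-loop decides IsChain (· ≠ ·)
lemma all_adjacent_iff (l : List String) :
    (((PySem.List.pyRange 0 ((l.length : Int) - 1) 1).all
        (fun i => (PySem.List.pyGet? l i).getD "" != (PySem.List.pyGet? l (i + 1)).getD "")) = true)
      ↔ List.IsChain (· ≠ ·) l := by
  rw [List.all_eq_true, List.isChain_iff_getElem]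
  constructor
  · intro hall k hk
    have h0 : (0 : Int) ≤ (k : Int) := Int.natCast_nonneg k
    have hmem : (k : Int) ∈ PySem.List.pyRange 0 ((l.length : Int) - 1) 1 := by
      rw [PySem.List.mem_pyRange_one]; omega
    have := hall (k : Int) hmem
    have g1 : PySem.List.pyGet? l (k : Int) = some (l[k]'(by omega)) :=
      PySem.List.pyGet?_ofNat l k (by omega)
    have g2 : PySem.List.pyGet? l ((k : Int) + 1) = some (l[k + 1]'hk) := by
      have hcast : ((k : Int) + 1) = ((k + 1 : ℕ) : Int) := by push_cast; ring
      rw [hcast]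
      exact PySem.List.pyGet?_ofNat l (k+1) hk
    rw [g1, g2] at this
    simpa using this
  · intro hd i hi
    rw [PySem.List.mem_pyRange_one] at hi
    obtain ⟨h0, h1⟩ := hi
    have hk2 : i.toNat + 1 < l.length := by omega
    have g1 : PySem.List.pyGet? l i = some (l[i.toNat]'(by omega)) := by
      conv_lhs => rw [show i = ((i.toNat : ℕ) : Int) from by omega]
      exact PySem.List.pyGet?_ofNat l i.toNat (by omega)
    have g2 : PySem.List.pyGet? l (i + 1) = some (l[i.toNat + 1]'hk2) := by
      conv_lhs => rw [show i + 1 = ((i.toNat + 1 : ℕ) : Int) from by omega]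
      exact PySem.List.pyGet?_ofNat l (i.toNat + 1) hk2
    rw [g1, g2]
    simpa using hd i.toNat hk2

-- ===== VERDICT (by name: the statement is the Claim_ definition above) =====
theorem check_spec : Claim_equal_check := by
  intro depth word _ hpre
  unfold Spec_check check check_alt
  have hall : ∀ i ∈ PySem.List.pyRange 0 ((word.toList.length : Int) - depth - 1) 1,
      ∃ p, pvPair depth word.toList i = some p := by
    intro i hi
    rw [PySem.List.mem_pyRange_one] at hi
    exact pvPair_isSome depth word.toList i hi.1 hi.2 hpre
  rw [checkGo_eq depth word.toList _ PySem.Set.empty List.nodup_nil hall]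
  simp only [PySem.Set.empty, List.nil_append]
  set pairs := (PySem.List.pyRange 0 ((word.toList.length : Int) - depth - 1) 1).map
      (fun i => (pvPair depth word.toList i).getD "") with hpairs
  set sp := PySem.List.sorted pairs (fun x => x) false with hsp
  rw [Bool.eq_iff_iff, decide_eq_true_iff, all_adjacent_iff sp]
  rw [← nodup_iff_isChain_ne sp (by simpa [hsp] using PySem.List.sorted_pairwise pairs (fun x => x))]
  exact (PySem.List.sorted_perm pairs (fun x => x) false).nodup_iff.symm
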